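-- pv_equiv track=rewrite | github.com/GodOrGovern/Project_Euler | problems/Python/e174.py | distinct_laminae
-- ===== SOURCE A (Python) =====
-- def distinct_laminae(max_tiles):
--     ''' Keeps track of how many distinct laminae can be made using up to
--     'max_tiles' tiles for each number of tiles '''
--     count = [0 for n in range(max_tiles+1)]
--     s = 3
--     perimeter = 8
--     while perimeter <= max_tiles:
--         count = laminae_num(s, max_tiles, count)
--         perimeter += 4
--         s += 1
--     return count
--
-- def laminae_num(s, max_tiles, count):
--     ''' For each lamina that can be formed with shortest side-length 's' and
--     using up to 'max_tiles' tiles, the index in 'count' with its number of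
--     tiles is incremented by one '''
--     perimeter = 4*s - 4
--     total_tiles = perimeter
--     while total_tiles <= max_tiles:
--         count[total_tiles] += 1
--         perimeter += 8
--         total_tiles += perimeter
--     return count
-- ===== SOURCE B (Python) =====
-- def distinct_laminae(max_tiles):
--     ''' Same counts via factorizing each lamina tile count as four times
--     a product u*v with u < v: for each multiple t of four up to max_tiles,
--     count[t] is the number of divisors of the quotient of t by four that
--     lie below its square root; the other entries keep their initial value. '''
--     count = [0] * (max_tiles + 1)
--     for m in range(2, max_tiles // 4 + 1):
--         c = 0
--         u = 1
--         while u * u < m: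
--             if m % u == 0:
--                 c += 1
--             u += 1
--         count[4 * m] = c
--     return count
-- ===== Notes on version B (the rewrite author's own statement) =====
-- stated objective: alternative
-- what changed: B replaces A's nested lamina-enumeration loops (outer scan over shortest side lengths, inner ring accumulation with += increments) by a direct per-entry computation: every lamina tile count factors as four times a product u*v with u < v, so for each multiple t of four up to max_tiles B sets count[t] to the number of divisors, smaller than its square root, of the quotient of t by four, found by trial division; no increments and no accumulation across loop iterations.
import Mathlib
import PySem

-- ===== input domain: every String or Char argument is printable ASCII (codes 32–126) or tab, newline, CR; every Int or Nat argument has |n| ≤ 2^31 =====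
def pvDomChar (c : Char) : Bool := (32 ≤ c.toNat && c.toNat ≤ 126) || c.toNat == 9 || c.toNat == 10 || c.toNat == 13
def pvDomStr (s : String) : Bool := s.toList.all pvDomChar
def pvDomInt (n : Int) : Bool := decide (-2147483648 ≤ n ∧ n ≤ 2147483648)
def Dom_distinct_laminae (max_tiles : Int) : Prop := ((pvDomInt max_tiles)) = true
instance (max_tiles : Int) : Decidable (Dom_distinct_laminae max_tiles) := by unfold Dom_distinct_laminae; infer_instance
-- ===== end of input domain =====

-- B replaces A's nested lamina-enumeration loops by a per-entry divisor count
-- (each lamina tile count factors as four times u*v with u < v): an alternative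
-- algorithm computing the same list.

-- ===== PORT A =====
-- count[i] += 1 ; every increment A executes has 0 ≤ i ≤ max_tiles < count.length,
-- where pySetD/pyGetD are exact.
def pvInc (count : List Int) (i : Int) : List Int :=
  PySem.List.pySetD count i (PySem.List.pyGetD count i 0 + 1)

-- the 'while total_tiles <= max_tiles' loop of laminae_num (fuel is never exhausted at the call sites)
def pvLamInner (fuel : Nat) (max_tiles perimeter total_tiles : Int) (count : List Int) : List Int :=
  match fuel with
  | 0 => count
  | f + 1 =>
    if total_tiles ≤ max_tiles then
      pvLamInner f max_tiles (perimeter + 8) (total_tiles + (perimeter + 8)) (pvInc count total_tiles)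
    else count

-- the 'while perimeter <= max_tiles' loop of distinct_laminae; the body is laminae_num inlined as a call
def pvLamOuter (fuel : Nat) (max_tiles s perimeter : Int) (count : List Int) : List Int :=
  match fuel with
  | 0 => count
  | f + 1 =>
    if perimeter ≤ max_tiles then
      pvLamOuter f max_tiles (s + 1) (perimeter + 4)
        (pvLamInner (max_tiles + 1).toNat max_tiles (4 * s - 4) (4 * s - 4) count)
    else count

def distinct_laminae (max_tiles : Int) : List Int :=
  pvLamOuter (max_tiles + 1).toNat max_tiles 3 8
    ((PySem.List.pyRange 0 (max_tiles + 1) 1).map (fun _ => (0 : Int)))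

-- ===== PORT B =====
-- the 'while u * u < m' trial-division loop of Source B, with its accumulator c
def pvDivCnt (m u c : Int) : Int :=
  if u * u < m then
    pvDivCnt m (u + 1) (if PySem.Int.mod m u = 0 then c + 1 else c)
  else c
termination_by (m - u).toNat
decreasing_by
  have hu : u < m := by nlinarith
  omega

-- the 'for m in range(2, max_tiles // 4 + 1)' loop of Source B
def distinct_laminae_alt (max_tiles : Int) : List Int :=
  (PySem.List.pyRange 2 (PySem.Int.floordiv max_tiles 4 + 1) 1).foldl
    (fun count m => PySem.List.pySetD count (4 * m) (pvDivCnt m 1 0))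
    (List.replicate (max_tiles + 1).toNat 0)

-- ===== PRECONDITION & SPEC =====
def Spec_distinct_laminae (max_tiles : Int) (out : List Int) : Prop := out = distinct_laminae_alt max_tiles
instance (max_tiles : Int) (out : List Int) : Decidable (Spec_distinct_laminae max_tiles out) := by unfold Spec_distinct_laminae; infer_instance

-- ===== CLAIM (what is proved, stated in full; the proofs are below) =====
def Claim_equal_distinct_laminae : Prop := ∀ (max_tiles : Int), Dom_distinct_laminae max_tiles → Spec_distinct_laminae max_tiles (distinct_laminae max_tiles)

-- ===== LEMMAS AND PROOFS =====

-- tile count of the lamina with inner loop index i and outer loop index k: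
-- A visits it as shortest side s = k+3, ring i; B reaches it as t = 4*(i+1)*(i+k+2).
def pvT (i k : Int) : Int := 4 * (i + 1) * (i + k + 2)

theorem pvT_step_i (i k : Int) : pvT (i + 1) k = pvT i k + (8 * i + 4 * k + 16) := by
  unfold pvT; ring

theorem pvT_step_k (i k : Int) : pvT i (k + 1) = pvT i k + (4 * i + 4) := by
  unfold pvT; ring

theorem pvT_nonneg {i k : Int} (hi : 0 ≤ i) (hk : 0 ≤ k) : 0 ≤ pvT i k := by
  unfold pvT; nlinarith

theorem pvT_mono_left {i j k : Int} (hk : 0 ≤ k) (hi : 0 ≤ i) (hij : i ≤ j) :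
    pvT i k ≤ pvT j k := by unfold pvT; nlinarith

theorem pvT_mono_right {i k l : Int} (hi : 0 ≤ i) (hkl : k ≤ l) :
    pvT i k ≤ pvT i l := by unfold pvT; nlinarith

-- pairs (i, k) visited by A's inner loop for fixed k, starting at ring i
def pvRowA (max k i : Int) : List (Int × Int) :=
  if h : 0 ≤ i ∧ 0 ≤ k ∧ pvT i k ≤ max then (i, k) :: pvRowA max k (i + 1) else []
termination_by (max + 1 - pvT i k).toNat
decreasing_by
  have h16 := pvT_step_i i k
  omega

-- all pairs A visits, k-major
def pvPairsA (max k : Int) : List (Int × Int) :=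
  if h : 0 ≤ k ∧ pvT 0 k ≤ max then pvRowA max k 0 ++ pvPairsA max (k + 1) else []
termination_by (max + 1 - pvT 0 k).toNat
decreasing_by
  have h4 := pvT_step_k 0 k
  omega

def pvStep (c : List Int) (p : Int × Int) : List Int := pvInc c (pvT p.1 p.2)

theorem pvRowA_mem (max k : Int) (p : Int × Int) :
    ∀ i : Int, 0 ≤ i → 0 ≤ k →
      (p ∈ pvRowA max k i ↔ i ≤ p.1 ∧ p.2 = k ∧ pvT p.1 p.2 ≤ max) := by
  refine pvRowA.induct max k
    (fun i => 0 ≤ i → 0 ≤ k → (p ∈ pvRowA max k i ↔ i ≤ p.1 ∧ p.2 = k ∧ pvT p.1 p.2 ≤ max)) ?_ ?_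
  · intro i h ih hi hk
    rw [pvRowA, dif_pos h]
    simp only [List.mem_cons]
    constructor
    · rintro (rfl | hp)
      · exact ⟨le_refl _, rfl, h.2.2⟩
      · obtain ⟨h1, h2, h3⟩ := (ih (by omega) hk).mp hp
        exact ⟨by omega, h2, h3⟩
    · rintro ⟨h1, h2, h3⟩
      rcases eq_or_lt_of_le h1 with heq | hlt
      · left; obtain ⟨p1, p2⟩ := p; simp_all
      · right; exact (ih (by omega) hk).mpr ⟨by omega, h2, h3⟩
  · intro i h hi hk
    rw [pvRowA, dif_neg h]
    simp only [List.not_mem_nil, false_iff]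
    rintro ⟨h1, h2, h3⟩
    exact h ⟨hi, hk, by subst h2; exact le_trans (pvT_mono_left hk hi h1) h3⟩

theorem pvPairsA_mem (max : Int) (p : Int × Int) :
    ∀ k : Int, 0 ≤ k →
      (p ∈ pvPairsA max k ↔ k ≤ p.2 ∧ 0 ≤ p.1 ∧ pvT p.1 p.2 ≤ max) := by
  refine pvPairsA.induct max
    (fun k => 0 ≤ k → (p ∈ pvPairsA max k ↔ k ≤ p.2 ∧ 0 ≤ p.1 ∧ pvT p.1 p.2 ≤ max)) ?_ ?_
  · intro k h ih hk
    rw [pvPairsA, dif_pos h]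
    simp only [List.mem_append]
    rw [pvRowA_mem max k p 0 le_rfl hk, ih (by omega)]
    constructor
    · rintro (⟨h1, h2, h3⟩ | ⟨h1, h2, h3⟩)
      · exact ⟨le_of_eq h2.symm, h1, h3⟩
      · exact ⟨by omega, h2, h3⟩
    · rintro ⟨h1, h2, h3⟩
      rcases eq_or_lt_of_le h1 with heq | hlt
      · exact Or.inl ⟨h2, heq.symm, h3⟩
      · exact Or.inr ⟨by omega, h2, h3⟩
  · intro k h hk
    rw [pvPairsA, dif_neg h]
    simp only [List.not_mem_nil, false_iff]
    rintro ⟨h1, h2, h3⟩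
    refine h ⟨hk, ?_⟩
    calc pvT 0 k ≤ pvT 0 p.2 := pvT_mono_right le_rfl h1
    _ ≤ pvT p.1 p.2 := pvT_mono_left (by omega) le_rfl h2
    _ ≤ max := h3

theorem pvRowA_nodup (max k : Int) : ∀ i : Int, 0 ≤ i → 0 ≤ k → (pvRowA max k i).Nodup := by
  refine pvRowA.induct max k (fun i => 0 ≤ i → 0 ≤ k → (pvRowA max k i).Nodup) ?_ ?_
  · intro i h ih hi hk
    rw [pvRowA, dif_pos h]
    refine List.nodup_cons.mpr ⟨?_, ih (by omega) hk⟩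
    intro hmem
    have := ((pvRowA_mem max k (i, k) (i + 1) (by omega) hk).mp hmem).1
    simp at this
  · intro i h _ _; rw [pvRowA, dif_neg h]; exact List.nodup_nil

theorem pvPairsA_nodup (max : Int) : ∀ k : Int, 0 ≤ k → (pvPairsA max k).Nodup := by
  refine pvPairsA.induct max (fun k => 0 ≤ k → (pvPairsA max k).Nodup) ?_ ?_
  · intro k h ih hk
    rw [pvPairsA, dif_pos h]
    refine List.Nodup.append (pvRowA_nodup max k 0 le_rfl hk) (ih (by omega)) ?_
    intro p hp hp'
    have h1 := ((pvRowA_mem max k p 0 le_rfl hk).mp hp).2.1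
    have h2 := ((pvPairsA_mem max p (k + 1) (by omega)).mp hp').1
    omega
  · intro k h _; rw [pvPairsA, dif_neg h]; exact List.nodup_nil

-- A's inner loop = fold over pvRowA
theorem pvLamInner_eq (max k : Int) (hk : 0 ≤ k) :
    ∀ (f : Nat) (i : Int) (c : List Int), 0 ≤ i → (max + 1 - pvT i k).toNat ≤ f →
      pvLamInner f max (4 * k + 8 + 8 * i) (pvT i k) c = (pvRowA max k i).foldl pvStep c := by
  intro f
  induction f with
  | zero =>
    intro i c hi hf
    have hT : ¬ pvT i k ≤ max := by omega
    rw [pvRowA, dif_neg (by tauto)]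
    rfl
  | succ f ih =>
    intro i c hi hf
    by_cases hT : pvT i k ≤ max
    · rw [pvRowA, dif_pos ⟨hi, hk, hT⟩]
      show pvLamInner (f + 1) max (4 * k + 8 + 8 * i) (pvT i k) c = _
      rw [pvLamInner, if_pos hT]
      have e1 : 4 * k + 8 + 8 * i + 8 = 4 * k + 8 + 8 * (i + 1) := by ring
      have e2 : pvT i k + (4 * k + 8 + 8 * i + 8) = pvT (i + 1) k := by rw [pvT_step_i]; ring
      rw [e2, e1, ih (i + 1) (pvInc c (pvT i k)) (by omega) (by have := pvT_step_i i k; omega)]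
      rfl
    · rw [pvRowA, dif_neg (by tauto), pvLamInner, if_neg hT]
      rfl

-- A's outer loop = fold over pvPairsA
theorem pvLamOuter_eq (max : Int) :
    ∀ (f : Nat) (k : Int) (c : List Int), 0 ≤ k → (max + 1 - pvT 0 k).toNat ≤ f →
      pvLamOuter f max (k + 3) (pvT 0 k) c = (pvPairsA max k).foldl pvStep c := by
  intro f
  induction f with
  | zero =>
    intro k c hk hf
    have hT : ¬ pvT 0 k ≤ max := by omega
    rw [pvPairsA, dif_neg (by tauto)]
    rfl
  | succ f ih =>
    intro k c hk hf
    by_cases hT : pvT 0 k ≤ max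
    · rw [pvPairsA, dif_pos ⟨hk, hT⟩, List.foldl_append]
      rw [pvLamOuter, if_pos hT]
      have e2 : 4 * (k + 3) - 4 = pvT 0 k := by unfold pvT; ring
      have hTnn : 0 ≤ pvT 0 k := pvT_nonneg le_rfl hk
      have hinner := pvLamInner_eq max k hk (max + 1).toNat 0 c le_rfl (by omega)
      rw [show (4 : Int) * k + 8 + 8 * 0 = 4 * (k + 3) - 4 by ring,
          show pvT 0 k = 4 * (k + 3) - 4 from e2.symm] at hinner
      rw [hinner]
      have e3 : k + 3 + 1 = (k + 1) + 3 := by ring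
      have e4 : pvT 0 k + 4 = pvT 0 (k + 1) := by rw [pvT_step_k]; ring
      rw [e3, e4, ih (k + 1) _ (by omega) (by have := pvT_step_k 0 k; omega)]
    · rw [pvPairsA, dif_neg (by tauto), pvLamOuter, if_neg hT]
      rfl

-- the two initial zero lists coincide
theorem pvZeros_eq (m : Int) :
    (PySem.List.pyRange 0 (m + 1) 1).map (fun _ => (0 : Int)) = List.replicate (m + 1).toNat 0 := by
  have h := PySem.List.length_pyRange_one 0 (m + 1)
  rw [List.map_const']
  rw [h]
  norm_num

-- pvInc preserves length and adds one at its (in-range) index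
theorem pvInc_length (c : List Int) (i : Int) : (pvInc c i).length = c.length := by
  unfold pvInc; exact PySem.List.length_pySetD c i _

theorem pvInc_getD (c : List Int) (i : Int) (j : Nat) (hi : 0 ≤ i) (hilen : i.toNat < c.length) :
    (pvInc c i).getD j 0 = c.getD j 0 + (if i = (j : Int) then 1 else 0) := by
  unfold pvInc
  rw [PySem.List.pySetD_of_nonneg _ _ hi, PySem.List.pyGetD_eq_getElem _ _ hi (by omega),
      List.getD_eq_getElem?_getD, List.getD_eq_getElem?_getD]
  by_cases h : i = (j : Int)
  · have hj : j = i.toNat := by omega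
    subst hj
    rw [if_pos h, List.getElem?_set_self (by omega)]
    simp [List.getElem?_eq_getElem hilen]
  · have hj : i.toNat ≠ j := by omega
    rw [if_neg h, List.getElem?_set_ne hj]
    simp

-- A's fold counts, at each index, how many visited pairs map there
theorem pvFoldA_getD (l : List (Int × Int)) :
    ∀ (c : List Int) (j : Nat),
      (∀ p ∈ l, 0 ≤ pvT p.1 p.2 ∧ (pvT p.1 p.2).toNat < c.length) →
      (l.foldl pvStep c).getD j 0
        = c.getD j 0 + (l.countP (fun p => pvT p.1 p.2 == (j : Int)) : Int) := by
  induction l with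
  | nil => intro c j h; simp
  | cons p l ih =>
    intro c j h
    have hp := h p (List.mem_cons_self ..)
    rw [List.foldl_cons,
        ih (pvStep c p) j (fun q hq => by
          constructor
          · exact (h q (List.mem_cons_of_mem _ hq)).1
          · rw [pvStep, pvInc_length]; exact (h q (List.mem_cons_of_mem _ hq)).2),
        List.countP_cons]
    rw [show pvStep c p = pvInc c (pvT p.1 p.2) from rfl, pvInc_getD c _ j hp.1 hp.2]
    by_cases he : pvT p.1 p.2 = (j : Int) <;> simp [he] <;> push_cast <;> ring

theorem pvFoldA_length (l : List (Int × Int)) :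
    ∀ c : List Int, (l.foldl pvStep c).length = c.length := by
  intro c
  induction l generalizing c with
  | nil => rfl
  | cons p l ih => simpa [List.foldl_cons, pvStep, pvInc_length] using ih (pvStep c p)

-- pvDivCnt counts the divisors w of m with w*w < m among w ≥ u
theorem pvDivCnt_eq (m : Int) :
    ∀ (u c : Int), 1 ≤ u →
      pvDivCnt m u c
        = c + ((PySem.List.pyRange u m 1).countP
            (fun w => decide (w * w < m) && decide (PySem.Int.mod m w = 0)) : Int) := by
  have H : ∀ (n : Nat) (u c : Int), (m - u).toNat ≤ n → 1 ≤ u →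
      pvDivCnt m u c
        = c + ((PySem.List.pyRange u m 1).countP
            (fun w => decide (w * w < m) && decide (PySem.Int.mod m w = 0)) : Int) := by
    intro n
    induction n with
    | zero =>
      intro u c hn hu
      have hmu : m ≤ u := by omega
      have hlt : ¬ u * u < m := by nlinarith
      rw [pvDivCnt, if_neg hlt, PySem.List.pyRange_one_eq_nil hmu]
      simp
    | succ n ih =>
      intro u c hn hu
      by_cases hlt : u * u < m
      · rw [pvDivCnt, if_pos hlt]
        have hum : u < m := by nlinarith
        rw [ih (u + 1) _ (by omega) (by omega), PySem.List.pyRange_one_cons hum, List.countP_cons]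
        by_cases hd : PySem.Int.mod m u = 0 <;> simp [hd, hlt] <;> push_cast <;> ring
      · rw [pvDivCnt, if_neg hlt]
        have hz : (PySem.List.pyRange u m 1).countP
            (fun w => decide (w * w < m) && decide (PySem.Int.mod m w = 0)) = 0 := by
          rw [List.countP_eq_zero]
          intro w hw
          have hw' := PySem.List.mem_pyRange_one.mp hw
          simp only [Bool.and_eq_true, decide_eq_true_eq, not_and]
          intro hww
          exfalso; nlinarith [hw'.1, hw'.2]
        rw [hz]; simp
  intro u c hu
  exact H (m - u).toNat u c le_rfl hu

-- B's fold, read back at an index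
theorem pvFoldB_getD (b : Int) :
    ∀ (a : Int) (c : List Int) (j : Nat),
      (∀ m', a ≤ m' → m' < b → 0 ≤ 4 * m' ∧ (4 * m').toNat < c.length) →
      (((PySem.List.pyRange a b 1).foldl
          (fun count m => PySem.List.pySetD count (4 * m) (pvDivCnt m 1 0)) c).getD j 0)
        = if a ≤ (j : Int) / 4 ∧ (j : Int) / 4 < b ∧ (j : Int) % 4 = 0 then
            pvDivCnt ((j : Int) / 4) 1 0
          else c.getD j 0 := by
  intro a
  have H : ∀ (n : Nat) (a : Int) (c : List Int) (j : Nat), (b - a).toNat ≤ n →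
      (∀ m', a ≤ m' → m' < b → 0 ≤ 4 * m' ∧ (4 * m').toNat < c.length) →
      (((PySem.List.pyRange a b 1).foldl
          (fun count m => PySem.List.pySetD count (4 * m) (pvDivCnt m 1 0)) c).getD j 0)
        = if a ≤ (j : Int) / 4 ∧ (j : Int) / 4 < b ∧ (j : Int) % 4 = 0 then
            pvDivCnt ((j : Int) / 4) 1 0
          else c.getD j 0 := by
    intro n
    induction n with
    | zero =>
      intro a c j hn hlen
      rw [PySem.List.pyRange_one_eq_nil (by omega), if_neg (by omega)]
      rfl
    | succ n ih =>
      intro a c j hn hlen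
      by_cases hab : a < b
      · rw [PySem.List.pyRange_one_cons hab, List.foldl_cons]
        have ha4 := hlen a le_rfl hab
        rw [ih (a + 1) _ j (by omega)
            (fun m' h1 h2 => by rw [PySem.List.length_pySetD]; exact hlen m' (by omega) h2)]
        by_cases h1 : a + 1 ≤ (j : Int) / 4 ∧ (j : Int) / 4 < b ∧ (j : Int) % 4 = 0
        · rw [if_pos h1, if_pos ⟨by omega, h1.2⟩]
        · rw [if_neg h1]
          by_cases h0 : a ≤ (j : Int) / 4 ∧ (j : Int) / 4 < b ∧ (j : Int) % 4 = 0
          · -- then j / 4 = a, i.e. (j : Int) = 4 * a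
            have hja : (j : Int) = 4 * a := by omega
            rw [if_pos h0, PySem.List.pySetD_of_nonneg _ _ ha4.1,
                List.getD_eq_getElem?_getD,
                show j = (4 * a).toNat by omega,
                List.getElem?_set_self (by omega)]
            simp only [Option.getD_some]
            congr 1
            omega
          · rw [if_neg h0, PySem.List.pySetD_of_nonneg _ _ ha4.1,
                List.getD_eq_getElem?_getD, List.getElem?_set_ne (by omega),
                ← List.getD_eq_getElem?_getD]
      · rw [PySem.List.pyRange_one_eq_nil (by omega), if_neg (by omega)]
        rfl
  exact fun c j hl => H (b - a).toNat a c j le_rfl hl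

theorem pvFoldB_length (b : Int) :
    ∀ (a : Int) (c : List Int),
      (((PySem.List.pyRange a b 1).foldl
          (fun count m => PySem.List.pySetD count (4 * m) (pvDivCnt m 1 0)) c)).length
        = c.length := by
  intro a c
  have H : ∀ (l : List Int) (c : List Int),
      ((l.foldl (fun count m => PySem.List.pySetD count (4 * m) (pvDivCnt m 1 0)) c)).length
        = c.length := by
    intro l
    induction l with
    | nil => intro c; rfl
    | cons x l ih => intro c; rw [List.foldl_cons, ih, PySem.List.length_pySetD]
  exact H _ c

-- the combinatorial core: at index 4*m (m ≥ 2, 4*m ≤ max), A's number of pairs is B's divisor count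
theorem pvCount_eq (max m : Int) (hm : 2 ≤ m) (hle : 4 * m ≤ max) :
    ((pvPairsA max 0).countP (fun p => pvT p.1 p.2 == 4 * m) : Int) = pvDivCnt m 1 0 := by
  rw [pvDivCnt_eq m 1 0 le_rfl, zero_add]
  congr 1
  rw [List.countP_eq_length_filter, List.countP_eq_length_filter,
      ← List.toFinset_card_of_nodup ((pvPairsA_nodup max 0 le_rfl).filter _),
      ← List.toFinset_card_of_nodup ((PySem.List.nodup_pyRange_one 1 m).filter _),
      List.toFinset_filter, List.toFinset_filter]
  refine Finset.card_nbij' (fun p => p.1 + 1) (fun u => (u - 1, m / u - u - 1)) ?_ ?_ ?_ ?_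
  · rintro ⟨i, k⟩ hp
    simp only [Finset.coe_filter, Set.mem_setOf_eq, List.mem_toFinset, beq_iff_eq] at hp ⊢
    obtain ⟨hmem, hT⟩ := hp
    obtain ⟨hk, hi, _⟩ := (pvPairsA_mem max (i, k) 0 le_rfl).mp hmem
    simp only [pvT] at hT
    have hfac : (i + 1) * (i + k + 2) = m := by linarith
    refine ⟨PySem.List.mem_pyRange_one.mpr ⟨by omega, by nlinarith⟩, ?_⟩
    simp only [Bool.and_eq_true, decide_eq_true_eq, PySem.Int.mod_eq_zero_iff_dvd]
    exact ⟨by nlinarith, ⟨i + k + 2, hfac.symm⟩⟩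
  · intro u hu
    simp only [Finset.coe_filter, Set.mem_setOf_eq, List.mem_toFinset, beq_iff_eq,
      Bool.and_eq_true, decide_eq_true_eq] at hu ⊢
    obtain ⟨hrange, huu, hmod⟩ := hu
    obtain ⟨hu1, hum⟩ := PySem.List.mem_pyRange_one.mp hrange
    have hdvd : u ∣ m := (PySem.Int.mod_eq_zero_iff_dvd m u).mp hmod
    obtain ⟨q, hq⟩ := hdvd
    have hq' : m / u = q := by rw [hq]; exact Int.mul_ediv_cancel_left q (by omega)
    have huq : u < q := by nlinarith
    constructor
    · refine (pvPairsA_mem max (u - 1, m / u - u - 1) 0 le_rfl).mpr ⟨?_, by omega, ?_⟩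
      · simp only; omega
      · simp only [pvT, hq']
        calc 4 * (u - 1 + 1) * (u - 1 + (q - u - 1) + 2) = 4 * (u * q) := by ring
        _ ≤ max := by rw [← hq]; exact hle
    · simp only [pvT, hq']
      calc 4 * (u - 1 + 1) * (u - 1 + (q - u - 1) + 2) = 4 * (u * q) := by ring
      _ = 4 * m := by rw [← hq]
  · rintro ⟨i, k⟩ hp
    simp only [Finset.coe_filter, Set.mem_setOf_eq, List.mem_toFinset, beq_iff_eq] at hp
    obtain ⟨hmem, hT⟩ := hp
    simp only [pvT] at hT
    have hfac : (i + 1) * (i + k + 2) = m := by linarith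
    have hdiv : m / (i + 1) = i + k + 2 := by
      rw [← hfac]; exact Int.mul_ediv_cancel_left _ (by
        obtain ⟨_, hi, _⟩ := (pvPairsA_mem max (i, k) 0 le_rfl).mp hmem
        omega)
    simp only [hdiv, Prod.mk.injEq]
    constructor <;> omega
  · intro u hu
    simp only; omega

-- off the multiples of 4 (or below 8), A's count is zero
theorem pvCount_zero (max : Int) (j : Int) (hj : ¬ (8 ≤ j ∧ j % 4 = 0)) :
    (pvPairsA max 0).countP (fun p => pvT p.1 p.2 == j) = 0 := by
  rw [List.countP_eq_zero]
  rintro ⟨i, k⟩ hp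
  obtain ⟨hk, hi, _⟩ := (pvPairsA_mem max (i, k) 0 le_rfl).mp hp
  simp only [beq_iff_eq, pvT]
  intro hT
  apply hj
  have h4 : (4 : Int) ∣ j := ⟨(i + 1) * (i + k + 2), by linear_combination hT.symm⟩
  constructor
  · nlinarith
  · omega

-- ===== VERDICT (by name: the statement is the Claim_ definition above) =====
theorem distinct_laminae_spec : Claim_equal_distinct_laminae := by
  intro max _
  unfold Spec_distinct_laminae distinct_laminae distinct_laminae_alt
  have hA := pvLamOuter_eq max (max + 1).toNat 0
    ((PySem.List.pyRange 0 (max + 1) 1).map (fun _ => (0 : Int))) le_rfl (by unfold pvT; omega)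
  rw [show (0 : Int) + 3 = 3 by ring, show pvT 0 0 = 8 by unfold pvT; ring] at hA
  rw [hA, pvZeros_eq max, PySem.Int.floordiv_eq_ediv_of_pos (by norm_num : (0:Int) < 4)]
  have hlen : (List.replicate (max + 1).toNat (0 : Int)).length = (max + 1).toNat := by
    simp
  have hcondA : ∀ p ∈ pvPairsA max 0,
      0 ≤ pvT p.1 p.2 ∧ (pvT p.1 p.2).toNat < (List.replicate (max + 1).toNat (0 : Int)).length := by
    rintro ⟨i, k⟩ hp
    dsimp only
    obtain ⟨hk, hi, hT⟩ := (pvPairsA_mem max (i, k) 0 le_rfl).mp hp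
    have hT' : pvT i k ≤ max := hT
    have h8 : 8 ≤ pvT i k := by unfold pvT; nlinarith
    rw [hlen]
    exact ⟨by omega, by omega⟩
  have hcondB : ∀ m', 2 ≤ m' → m' < max / 4 + 1 →
      0 ≤ 4 * m' ∧ (4 * m').toNat < (List.replicate (max + 1).toNat (0 : Int)).length := by
    intro m' h1 h2
    rw [hlen]
    omega
  apply List.ext_getElem
  · rw [pvFoldA_length, pvFoldB_length]
  · intro n h1 h2
    have eA := pvFoldA_getD (pvPairsA max 0) (List.replicate (max + 1).toNat 0) n hcondA
    have eB := pvFoldB_getD (max / 4 + 1) 2 (List.replicate (max + 1).toNat 0) n hcondB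
    have hn : n < (max + 1).toNat := by rw [pvFoldA_length, hlen] at h1; exact h1
    have hrep : (List.replicate (max + 1).toNat (0 : Int)).getD n 0 = 0 := by
      rw [List.getD_eq_getElem _ 0 (by rw [hlen]; exact hn), List.getElem_replicate]
    rw [hrep, zero_add] at eA
    rw [hrep] at eB
    rw [← List.getD_eq_getElem _ 0 h1, ← List.getD_eq_getElem _ 0 h2, eA, eB]
    have hnmax : (n : Int) ≤ max := by omega
    by_cases hc : 8 ≤ (n : Int) ∧ (n : Int) % 4 = 0
    · rw [if_pos (by omega)]
      have h4 : (n : Int) = 4 * ((n : Int) / 4) := by omega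
      rw [show (fun p : Int × Int => pvT p.1 p.2 == (n : Int))
            = (fun p : Int × Int => pvT p.1 p.2 == 4 * ((n : Int) / 4)) by rw [← h4]]
      exact pvCount_eq max ((n : Int) / 4) (by omega) (by omega)
    · rw [if_neg (by omega), pvCount_zero max (n : Int) hc]
      simp
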